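-- pv_equiv track=rewrite | github.com/senseielectrico/smart-search-pro | tools/metadata_analyzer.py | _extract_author_info
-- ===== SOURCE A (Python) =====
-- from typing import Dict, List, Optional, Union, Any, Tuple
--
-- def _extract_author_info(metadata: Dict) -> Dict[str, Any]:
--     """Extract author and creator information."""
--     author_info = {}
--
--     # Author fields
--     author_fields = {
--         'author': ['EXIF:Artist', 'Artist', 'Creator', 'XMP:Creator'],
--         'by_line': ['IPTC:By-line', 'By-line'],
--         'owner': ['EXIF:OwnerName', 'OwnerName'],
--         'credit': ['IPTC:Credit', 'Credit'],
--         'source': ['IPTC:Source', 'Source']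
--     }
--
--     for key, fields in author_fields.items():
--         for field in fields:
--             if field in metadata:
--                 author_info[key] = metadata[field]
--                 break
--
--     return author_info
-- ===== SOURCE B (Python) =====
-- def _extract_author_info(metadata):
--     """Extract author and creator information (single pass over metadata with a reverse field index)."""
--     author_fields = {
--         'author': ['EXIF:Artist', 'Artist', 'Creator', 'XMP:Creator'],
--         'by_line': ['IPTC:By-line', 'By-line'],
--         'owner': ['EXIF:OwnerName', 'OwnerName'],
--         'credit': ['IPTC:Credit', 'Credit'],
--         'source': ['IPTC:Source', 'Source']
--     }
--     field_index = {}
--     for key, fields in author_fields.items():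
--         for rank, field in enumerate(fields):
--             field_index[field] = (key, rank)
--     best = {}
--     for field, value in metadata.items():
--         info = field_index.get(field)
--         if info is not None:
--             key, rank = info
--             if key not in best or rank < best[key][0]:
--                 best[key] = (rank, value)
--     return {key: best[key][1] for key in author_fields if key in best}
-- ===== Notes on version B (the rewrite author's own statement) =====
-- stated objective: alternative
-- what changed: Replaces A's per-output-key scan over candidate field lists with a prebuilt reverse index (field -> (key, rank)) and a single pass over the metadata items keeping the minimal-rank candidate per output key.
import Mathlib
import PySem

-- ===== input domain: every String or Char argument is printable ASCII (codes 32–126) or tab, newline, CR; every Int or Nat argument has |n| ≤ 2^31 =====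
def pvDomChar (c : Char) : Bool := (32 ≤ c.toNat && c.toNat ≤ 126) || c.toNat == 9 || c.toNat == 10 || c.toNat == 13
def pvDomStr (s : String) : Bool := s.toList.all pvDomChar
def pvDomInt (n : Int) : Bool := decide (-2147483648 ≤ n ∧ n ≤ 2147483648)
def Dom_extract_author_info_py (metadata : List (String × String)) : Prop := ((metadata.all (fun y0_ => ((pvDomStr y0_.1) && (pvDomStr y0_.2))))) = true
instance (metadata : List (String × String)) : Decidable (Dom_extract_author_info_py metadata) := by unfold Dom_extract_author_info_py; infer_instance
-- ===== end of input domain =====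

-- B replaces A's per-key scan over candidate field lists by a prebuilt reverse field
-- index and ONE pass over metadata keeping the best (minimal-rank) field per output key
-- (objective: alternative decomposition, same result).

-- ===== PORT A =====
-- the author_fields dict (shared constant of both Pythons)
def pvAuthorFields : List (String × List String) :=
  [("author", ["EXIF:Artist", "Artist", "Creator", "XMP:Creator"]),
   ("by_line", ["IPTC:By-line", "By-line"]),
   ("owner", ["EXIF:OwnerName", "OwnerName"]),
   ("credit", ["IPTC:Credit", "Credit"]),
   ("source", ["IPTC:Source", "Source"])]

-- A's inner loop 'for field in fields: if field in metadata: …; break':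
-- value of the first field present in metadata
def pvFirstVal (md : PySem.Dict String String) : List String → Option String
  | [] => none
  | f :: fs =>
    match md.get? f with
    | some v => some v
    | none => pvFirstVal md fs

def extract_author_info_py (metadata : List (String × String)) : List (String × String) :=
  let md := PySem.Dict.mk metadata
  (pvAuthorFields.foldl (fun author_info kf =>
      match pvFirstVal md kf.2 with
      | some v => author_info.insert kf.1 v
      | none => author_info) PySem.Dict.empty).items

-- ===== PORT B =====
-- Source B's field_index: every candidate field ↦ (output key, rank in its list)
def pvFieldIndex : PySem.Dict String (String × Int) :=
  pvAuthorFields.foldl (fun fi kf =>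
    (PySem.List.enumerate kf.2 0).foldl (fun fi rf => fi.insert rf.2 (kf.1, rf.1)) fi)
    PySem.Dict.empty

-- Source B's loop body: keep the strictly better (smaller-rank) candidate per key
def pvBestStep (b : PySem.Dict String (Int × String)) (fv : String × String) :
    PySem.Dict String (Int × String) :=
  match pvFieldIndex.get? fv.1 with
  | some kr =>
    match b.get? kr.1 with
    | none => b.insert kr.1 (kr.2, fv.2)
    | some rv => if kr.2 < rv.1 then b.insert kr.1 (kr.2, fv.2) else b
  | none => b

def extract_author_info_py_alt (metadata : List (String × String)) : List (String × String) :=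
  let best := metadata.foldl pvBestStep PySem.Dict.empty
  (pvAuthorFields.foldl (fun out kf =>
      match best.get? kf.1 with
      | some rv => out.insert kf.1 rv.2
      | none => out) PySem.Dict.empty).items

-- ===== PRECONDITION & SPEC =====
def Spec_extract_author_info_py (metadata : List (String × String)) (out : List (String × String)) : Prop := out = extract_author_info_py_alt metadata
instance (metadata : List (String × String)) (out : List (String × String)) : Decidable (Spec_extract_author_info_py metadata out) := by unfold Spec_extract_author_info_py; infer_instance

-- ===== CLAIM (what is proved, stated in full; the proofs are below) =====
def Claim_equal_extract_author_info_py : Prop := ∀ (metadata : List (String × String)), Dom_extract_author_info_py metadata → Spec_extract_author_info_py metadata (extract_author_info_py metadata)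

-- ===== LEMMAS AND PROOFS =====

-- the rank pvFieldIndex assigns a field f with respect to a fixed output key k
def pvRank (k f : String) : Option Int :=
  match pvFieldIndex.get? f with
  | some kr => if kr.1 = k then some kr.2 else none
  | none => none

-- scalar shadow of pvBestStep for a fixed output key k
def pvSStep (k : String) (acc : Option (Int × String)) (fv : String × String) :
    Option (Int × String) :=
  match pvRank k fv.1 with
  | some r =>
    match acc with
    | none => some (r, fv.2)
    | some rv => if r < rv.1 then some (r, fv.2) else some rv
  | none => acc

-- left-biased minimum-rank merge
def pvMerge (a c : Option (Int × String)) : Option (Int × String) :=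
  match a, c with
  | none, c => c
  | some x, none => some x
  | some x, some y => if y.1 < x.1 then some y else some x

-- rank of f in a field list starting at index i
def pvRankIn : List String → Int → String → Option Int
  | [], _, _ => none
  | g :: gs, i, f => if f = g then some i else pvRankIn gs (i + 1) f

-- ranked variant of A's inner scan
def pvScan : List String → Int → PySem.Dict String String → Option (Int × String)
  | [], _, _ => none
  | f :: t, i, md =>
    match md.get? f with
    | some v => some (i, v)
    | none => pvScan t (i + 1) md

lemma pvBestStep_get? (b : PySem.Dict String (Int × String)) (fv : String × String)
    (k : String) : (pvBestStep b fv).get? k = pvSStep k (b.get? k) fv := by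
  unfold pvBestStep pvSStep pvRank
  rcases h : pvFieldIndex.get? fv.1 with _ | ⟨k', r⟩
  · simp
  · simp only
    by_cases hk : k' = k
    · subst hk
      rcases hb : b.get? k' with _ | ⟨r', v'⟩ <;> simp [hb, PySem.Dict.get?_insert]
      split_ifs <;> simp [PySem.Dict.get?_insert, hb]
    · rcases hb : b.get? k' with _ | ⟨r', v'⟩ <;>
        simp [hb, PySem.Dict.get?_insert, hk, Ne.symm hk]
      split_ifs <;> simp [PySem.Dict.get?_insert, Ne.symm hk]

lemma foldl_best_get? (m : List (String × String)) (b : PySem.Dict String (Int × String))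
    (k : String) :
    (m.foldl pvBestStep b).get? k = m.foldl (pvSStep k) (b.get? k) := by
  induction m generalizing b with
  | nil => rfl
  | cons fv m ih => simp only [List.foldl_cons, ih, pvBestStep_get?]

lemma pvSStep_merge (k : String) (a : Option (Int × String)) (fv : String × String) :
    pvSStep k a fv = pvMerge a (pvSStep k none fv) := by
  unfold pvSStep pvMerge
  rcases h : pvRank k fv.1 with _ | r <;> rcases a with _ | ⟨r', v'⟩ <;> simp <;>
    split_ifs <;> simp_all

lemma pvMerge_assoc (a b c : Option (Int × String)) :
    pvMerge (pvMerge a b) c = pvMerge a (pvMerge b c) := by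
  rcases a with _ | ⟨ra, va⟩
  · rfl
  rcases b with _ | ⟨rb, vb⟩
  · rfl
  rcases c with _ | ⟨rc, vc⟩
  · show pvMerge (if rb < ra then _ else _) none = _
    split_ifs with h <;> simp [pvMerge, h]
  by_cases h1 : rb < ra <;> by_cases h2 : rc < rb <;> by_cases h3 : rc < ra <;>
    simp [pvMerge, h1, h2, h3] <;> (exfalso; omega)

lemma foldl_sstep_merge (m : List (String × String)) (k : String)
    (a : Option (Int × String)) :
    m.foldl (pvSStep k) a = pvMerge a (m.foldl (pvSStep k) none) := by
  induction m generalizing a with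
  | nil => cases a <;> rfl
  | cons fv m ih =>
    simp only [List.foldl_cons]
    rw [ih, ih (pvSStep k none fv), pvSStep_merge, pvMerge_assoc]

lemma pvRankIn_ge (fs : List String) (i : Int) (f : String) (r : Int)
    (h : pvRankIn fs i f = some r) : i ≤ r := by
  induction fs generalizing i with
  | nil => simp [pvRankIn] at h
  | cons g gs ih =>
    unfold pvRankIn at h
    split_ifs at h with hf
    · simp at h; omega
    · have := ih (i + 1) h; omega

lemma pvScan_ge (fs : List String) (i : Int) (md : PySem.Dict String String)
    (r : Int) (v : String) (h : pvScan fs i md = some (r, v)) : i ≤ r := by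
  induction fs generalizing i with
  | nil => simp [pvScan] at h
  | cons f t ih =>
    unfold pvScan at h
    rcases hg : md.get? f with _ | v' <;> simp [hg] at h
    · have := ih (i + 1) h; omega
    · omega

lemma pvScan_cons (fs : List String) (i : Int) (f v : String)
    (m : List (String × String)) :
    pvScan fs i (PySem.Dict.mk ((f, v) :: m)) =
      pvMerge ((pvRankIn fs i f).map (fun r => (r, v))) (pvScan fs i (PySem.Dict.mk m)) := by
  induction fs generalizing i with
  | nil => rfl
  | cons f0 t ih =>
    by_cases hf : f = f0
    · subst hf
      have hL : pvScan (f :: t) i (PySem.Dict.mk ((f, v) :: m)) = some (i, v) := by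
        unfold pvScan; rw [PySem.Dict.get?_mk_cons]; simp
      have hR : pvRankIn (f :: t) i f = some i := by simp [pvRankIn]
      rw [hL, hR]
      rcases hs : pvScan (f :: t) i (PySem.Dict.mk m) with _ | ⟨r', v'⟩
      · rfl
      · have := pvScan_ge _ _ _ _ _ hs
        simp only [Option.map_some, pvMerge]
        split_ifs <;> first | rfl | (exfalso; omega)
    · have hb : (f == f0) = false := by simpa using hf
      have hrank : pvRankIn (f0 :: t) i f = pvRankIn t (i + 1) f := by
        simp [pvRankIn, hf]
      rcases hg : (PySem.Dict.mk m).get? f0 with _ | v'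
      · have hL : pvScan (f0 :: t) i (PySem.Dict.mk ((f, v) :: m)) =
            pvScan t (i + 1) (PySem.Dict.mk ((f, v) :: m)) := by
          unfold pvScan; rw [PySem.Dict.get?_mk_cons]; simp [hb, hg]
          conv_rhs => rw [← pvScan.eq_def]
        have hR : pvScan (f0 :: t) i (PySem.Dict.mk m) = pvScan t (i + 1) (PySem.Dict.mk m) := by
          unfold pvScan; rw [hg]
          conv_rhs => rw [← pvScan.eq_def]
        rw [hL, hR, hrank, ih (i + 1)]
      · have hL : pvScan (f0 :: t) i (PySem.Dict.mk ((f, v) :: m)) = some (i, v') := by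
          unfold pvScan; rw [PySem.Dict.get?_mk_cons]; simp [hb, hg]
        have hR : pvScan (f0 :: t) i (PySem.Dict.mk m) = some (i, v') := by
          unfold pvScan; rw [hg]
        rw [hL, hR, hrank]
        rcases hr : pvRankIn t (i + 1) f with _ | r
        · rfl
        · have := pvRankIn_ge _ _ _ _ hr
          simp only [Option.map_some, pvMerge]
          split_ifs <;> first | rfl | (exfalso; omega)

lemma pvScan_empty (fs : List String) (i : Int) :
    pvScan fs i (PySem.Dict.mk ([] : List (String × String))) = none := by
  induction fs generalizing i with
  | nil => rfl
  | cons f t ih =>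
    unfold pvScan
    have : (PySem.Dict.mk ([] : List (String × String))).get? f = none := rfl
    simp [this, ih]

lemma foldl_sstep_scan (k : String) (fs : List String)
    (H : ∀ f, pvRank k f = pvRankIn fs 0 f) (m : List (String × String)) :
    m.foldl (pvSStep k) none = pvScan fs 0 (PySem.Dict.mk m) := by
  induction m with
  | nil => simp [pvScan_empty]
  | cons fv m ih =>
    simp only [List.foldl_cons]
    rw [foldl_sstep_merge, ih, pvScan_cons, ← H]
    congr 1
    unfold pvSStep
    rcases h : pvRank k fv.1 with _ | r <;> simp [h]

lemma pvScan_map_snd (fs : List String) (i : Int) (md : PySem.Dict String String) :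
    (pvScan fs i md).map (·.2) = pvFirstVal md fs := by
  induction fs generalizing i with
  | nil => rfl
  | cons f t ih =>
    unfold pvScan pvFirstVal
    rcases hg : md.get? f with _ | v <;> simp [hg, ih]

-- pvFieldIndex as a literal dict (closed computation)
lemma pvFieldIndex_eq : pvFieldIndex = PySem.Dict.mk
    [("EXIF:Artist", ("author", 0)), ("Artist", ("author", 1)), ("Creator", ("author", 2)),
     ("XMP:Creator", ("author", 3)), ("IPTC:By-line", ("by_line", 0)), ("By-line", ("by_line", 1)),
     ("EXIF:OwnerName", ("owner", 0)), ("OwnerName", ("owner", 1)),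
     ("IPTC:Credit", ("credit", 0)), ("Credit", ("credit", 1)),
     ("IPTC:Source", ("source", 0)), ("Source", ("source", 1))] := by decide

lemma bridge_author (f : String) :
    pvRank "author" f = pvRankIn ["EXIF:Artist", "Artist", "Creator", "XMP:Creator"] 0 f := by
  by_cases h0 : f = "EXIF:Artist"
  · subst h0; decide
  by_cases h1 : f = "Artist"
  · subst h1; decide
  by_cases h2 : f = "Creator"
  · subst h2; decide
  by_cases h3 : f = "XMP:Creator"
  · subst h3; decide
  by_cases h4 : f = "IPTC:By-line"
  · subst h4; decide
  by_cases h5 : f = "By-line"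
  · subst h5; decide
  by_cases h6 : f = "EXIF:OwnerName"
  · subst h6; decide
  by_cases h7 : f = "OwnerName"
  · subst h7; decide
  by_cases h8 : f = "IPTC:Credit"
  · subst h8; decide
  by_cases h9 : f = "Credit"
  · subst h9; decide
  by_cases h10 : f = "IPTC:Source"
  · subst h10; decide
  by_cases h11 : f = "Source"
  · subst h11; decide
  simp [pvRank, pvFieldIndex_eq, PySem.Dict.get?_mk_cons, PySem.Dict.get?, pvRankIn,
    Ne.symm h0, Ne.symm h1, Ne.symm h2, Ne.symm h3, Ne.symm h4, Ne.symm h5, Ne.symm h6, Ne.symm h7, Ne.symm h8, Ne.symm h9, Ne.symm h10, Ne.symm h11,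
    h0, h1, h2, h3, h4, h5, h6, h7, h8, h9, h10, h11]

lemma bridge_byline (f : String) :
    pvRank "by_line" f = pvRankIn ["IPTC:By-line", "By-line"] 0 f := by
  by_cases h0 : f = "EXIF:Artist"
  · subst h0; decide
  by_cases h1 : f = "Artist"
  · subst h1; decide
  by_cases h2 : f = "Creator"
  · subst h2; decide
  by_cases h3 : f = "XMP:Creator"
  · subst h3; decide
  by_cases h4 : f = "IPTC:By-line"
  · subst h4; decide
  by_cases h5 : f = "By-line"
  · subst h5; decide
  by_cases h6 : f = "EXIF:OwnerName"
  · subst h6; decide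
  by_cases h7 : f = "OwnerName"
  · subst h7; decide
  by_cases h8 : f = "IPTC:Credit"
  · subst h8; decide
  by_cases h9 : f = "Credit"
  · subst h9; decide
  by_cases h10 : f = "IPTC:Source"
  · subst h10; decide
  by_cases h11 : f = "Source"
  · subst h11; decide
  simp [pvRank, pvFieldIndex_eq, PySem.Dict.get?_mk_cons, PySem.Dict.get?, pvRankIn,
    Ne.symm h0, Ne.symm h1, Ne.symm h2, Ne.symm h3, Ne.symm h4, Ne.symm h5, Ne.symm h6, Ne.symm h7, Ne.symm h8, Ne.symm h9, Ne.symm h10, Ne.symm h11,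
    h0, h1, h2, h3, h4, h5, h6, h7, h8, h9, h10, h11]

lemma bridge_owner (f : String) :
    pvRank "owner" f = pvRankIn ["EXIF:OwnerName", "OwnerName"] 0 f := by
  by_cases h0 : f = "EXIF:Artist"
  · subst h0; decide
  by_cases h1 : f = "Artist"
  · subst h1; decide
  by_cases h2 : f = "Creator"
  · subst h2; decide
  by_cases h3 : f = "XMP:Creator"
  · subst h3; decide
  by_cases h4 : f = "IPTC:By-line"
  · subst h4; decide
  by_cases h5 : f = "By-line"
  · subst h5; decide
  by_cases h6 : f = "EXIF:OwnerName"
  · subst h6; decide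
  by_cases h7 : f = "OwnerName"
  · subst h7; decide
  by_cases h8 : f = "IPTC:Credit"
  · subst h8; decide
  by_cases h9 : f = "Credit"
  · subst h9; decide
  by_cases h10 : f = "IPTC:Source"
  · subst h10; decide
  by_cases h11 : f = "Source"
  · subst h11; decide
  simp [pvRank, pvFieldIndex_eq, PySem.Dict.get?_mk_cons, PySem.Dict.get?, pvRankIn,
    Ne.symm h0, Ne.symm h1, Ne.symm h2, Ne.symm h3, Ne.symm h4, Ne.symm h5, Ne.symm h6, Ne.symm h7, Ne.symm h8, Ne.symm h9, Ne.symm h10, Ne.symm h11,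
    h0, h1, h2, h3, h4, h5, h6, h7, h8, h9, h10, h11]

lemma bridge_credit (f : String) :
    pvRank "credit" f = pvRankIn ["IPTC:Credit", "Credit"] 0 f := by
  by_cases h0 : f = "EXIF:Artist"
  · subst h0; decide
  by_cases h1 : f = "Artist"
  · subst h1; decide
  by_cases h2 : f = "Creator"
  · subst h2; decide
  by_cases h3 : f = "XMP:Creator"
  · subst h3; decide
  by_cases h4 : f = "IPTC:By-line"
  · subst h4; decide
  by_cases h5 : f = "By-line"
  · subst h5; decide
  by_cases h6 : f = "EXIF:OwnerName"
  · subst h6; decide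
  by_cases h7 : f = "OwnerName"
  · subst h7; decide
  by_cases h8 : f = "IPTC:Credit"
  · subst h8; decide
  by_cases h9 : f = "Credit"
  · subst h9; decide
  by_cases h10 : f = "IPTC:Source"
  · subst h10; decide
  by_cases h11 : f = "Source"
  · subst h11; decide
  simp [pvRank, pvFieldIndex_eq, PySem.Dict.get?_mk_cons, PySem.Dict.get?, pvRankIn,
    Ne.symm h0, Ne.symm h1, Ne.symm h2, Ne.symm h3, Ne.symm h4, Ne.symm h5, Ne.symm h6, Ne.symm h7, Ne.symm h8, Ne.symm h9, Ne.symm h10, Ne.symm h11,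
    h0, h1, h2, h3, h4, h5, h6, h7, h8, h9, h10, h11]

lemma bridge_source (f : String) :
    pvRank "source" f = pvRankIn ["IPTC:Source", "Source"] 0 f := by
  by_cases h0 : f = "EXIF:Artist"
  · subst h0; decide
  by_cases h1 : f = "Artist"
  · subst h1; decide
  by_cases h2 : f = "Creator"
  · subst h2; decide
  by_cases h3 : f = "XMP:Creator"
  · subst h3; decide
  by_cases h4 : f = "IPTC:By-line"
  · subst h4; decide
  by_cases h5 : f = "By-line"
  · subst h5; decide
  by_cases h6 : f = "EXIF:OwnerName"
  · subst h6; decide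
  by_cases h7 : f = "OwnerName"
  · subst h7; decide
  by_cases h8 : f = "IPTC:Credit"
  · subst h8; decide
  by_cases h9 : f = "Credit"
  · subst h9; decide
  by_cases h10 : f = "IPTC:Source"
  · subst h10; decide
  by_cases h11 : f = "Source"
  · subst h11; decide
  simp [pvRank, pvFieldIndex_eq, PySem.Dict.get?_mk_cons, PySem.Dict.get?, pvRankIn,
    Ne.symm h0, Ne.symm h1, Ne.symm h2, Ne.symm h3, Ne.symm h4, Ne.symm h5, Ne.symm h6, Ne.symm h7, Ne.symm h8, Ne.symm h9, Ne.symm h10, Ne.symm h11,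
    h0, h1, h2, h3, h4, h5, h6, h7, h8, h9, h10, h11]

lemma bridge (kf : String × List String) (hkf : kf ∈ pvAuthorFields) (f : String) :
    pvRank kf.1 f = pvRankIn kf.2 0 f := by
  fin_cases hkf
  exacts [bridge_author f, bridge_byline f, bridge_owner f, bridge_credit f, bridge_source f]

-- ===== VERDICT (by name: the statement is the Claim_ definition above) =====
theorem extract_author_info_py_spec : Claim_equal_extract_author_info_py := by
  intro metadata _
  unfold Spec_extract_author_info_py extract_author_info_py extract_author_info_py_alt
  dsimp only
  congr 1
  apply PySem.List.foldl_congr_mem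
  intro acc kf hkf
  have hbest : (metadata.foldl pvBestStep PySem.Dict.empty).get? kf.1
      = pvScan kf.2 0 (PySem.Dict.mk metadata) := by
    rw [foldl_best_get?]
    have he : (PySem.Dict.empty : PySem.Dict String (Int × String)).get? kf.1 = none := rfl
    rw [he, foldl_sstep_scan kf.1 kf.2 (bridge kf hkf)]
  have hsnd := pvScan_map_snd kf.2 0 (PySem.Dict.mk metadata)
  rw [hbest]
  rcases hs : pvScan kf.2 0 (PySem.Dict.mk metadata) with _ | ⟨r, v⟩ <;>
    rw [hs] at hsnd <;> simp at hsnd <;> rw [← hsnd]
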